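-- pv_equiv track=rewrite | github.com/adanthony53/cse415 | a1.py | pair_off
-- ===== SOURCE A (Python) =====
-- def pair_off(l):
--     res = []
--     if len(l) == 0:
--         return res
--
--     num = 0
--     for item in l:
--         if num % 2 == 0:
--             temp = [item]
--         else:
--             temp.append(item)
--             res.append(temp)
--         num = num + 1
--
--     if len(temp) == 1:
--         res.append(temp)
--     return res
-- ===== SOURCE B (Python) =====
-- def pair_off(l):
--     return [l[i:i+2] for i in range(0, len(l), 2)]
-- ===== Notes on version B (the rewrite author's own statement) =====
-- stated objective: idiomatic
-- what changed: Replaced the element loop with a parity counter, a temp accumulator and a leftover-append branch by a single slice comprehension over start indices stepping by 2, relying on slicing to yield the odd singleton tail.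
import Mathlib
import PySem

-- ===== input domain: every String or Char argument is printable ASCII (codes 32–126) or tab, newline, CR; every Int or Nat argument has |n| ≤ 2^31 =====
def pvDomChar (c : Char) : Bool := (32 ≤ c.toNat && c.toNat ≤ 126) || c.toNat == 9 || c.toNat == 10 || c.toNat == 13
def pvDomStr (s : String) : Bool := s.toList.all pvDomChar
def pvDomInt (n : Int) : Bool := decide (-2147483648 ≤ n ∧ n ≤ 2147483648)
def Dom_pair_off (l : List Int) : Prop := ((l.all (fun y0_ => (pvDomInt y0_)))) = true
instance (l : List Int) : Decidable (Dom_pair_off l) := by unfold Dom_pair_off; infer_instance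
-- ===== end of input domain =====

-- B replaces A's parity-counter loop (temp accumulator + leftover-append branch) by a single
-- slice comprehension over start indices stepping by 2 (objective: idiomatic).

-- ===== PORT A =====
-- the for-loop over l with state (res, temp, num); returns the final (res, temp)
def pairOffLoop : List Int → List (List Int) → List Int → Int → (List (List Int)) × List Int
  | [], res, temp, _ => (res, temp)
  | item :: rest, res, temp, num =>
      if PySem.Int.mod num 2 = 0 then
        pairOffLoop rest res [item] (num + 1)
      else
        pairOffLoop rest (res ++ [temp ++ [item]]) (temp ++ [item]) (num + 1)

def pair_off (l : List Int) : List (List Int) :=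
  if l.length = 0 then []
  else
    let p := pairOffLoop l [] [] 0
    if p.2.length = 1 then p.1 ++ [p.2] else p.1

-- ===== PORT B =====
-- [l[i:i+2] for i in range(0, len(l), 2)]
def pair_off_alt (l : List Int) : List (List Int) :=
  (PySem.List.pyRange 0 (l.length : Int) 2).map
    (fun i => PySem.List.slice l (some i) (some (i + 2)))

-- ===== PRECONDITION & SPEC =====
def Spec_pair_off (l : List Int) (out : List (List Int)) : Prop := out = pair_off_alt l
instance (l : List Int) (out : List (List Int)) : Decidable (Spec_pair_off l out) := by unfold Spec_pair_off; infer_instance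

-- ===== CLAIM (what is proved, stated in full; the proofs are below) =====
def Claim_equal_pair_off : Prop := ∀ (l : List Int), Dom_pair_off l → Spec_pair_off l (pair_off l)

-- ===== LEMMAS AND PROOFS =====

-- proof-side characterisation: the list chunked into consecutive pairs (odd tail a singleton)
def chunk : List Int → List (List Int)
  | [] => []
  | [x] => [[x]]
  | x :: y :: xs => [x, y] :: chunk xs

theorem chunk_cons_cons (x y : Int) (xs : List Int) :
    chunk (x :: y :: xs) = [x, y] :: chunk xs := rfl

theorem mod_two_even (k : Int) : PySem.Int.mod (2 * k) 2 = 0 := by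
  rw [PySem.Int.mod_eq_emod_of_pos (by omega : (0:Int) < 2)]; omega

theorem mod_two_odd (k : Int) : ¬ PySem.Int.mod (2 * k + 1) 2 = 0 := by
  rw [PySem.Int.mod_eq_emod_of_pos (by omega : (0:Int) < 2)]; omega

theorem pairOffLoop_cons (x : Int) (xs : List Int) (res : List (List Int)) (t : List Int) (num : Int) :
    pairOffLoop (x :: xs) res t num
      = if PySem.Int.mod num 2 = 0 then pairOffLoop xs res [x] (num + 1)
        else pairOffLoop xs (res ++ [t ++ [x]]) (t ++ [x]) (num + 1) := rfl

-- loop invariant: entering the loop at an even counter with a non-singleton temp,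
-- the finished loop result equals res ++ chunk xs
theorem pairOffLoop_spec (xs : List Int) :
    ∀ (res : List (List Int)) (t : List Int) (k : Int), t.length ≠ 1 →
      (let p := pairOffLoop xs res t (2 * k);
       (if p.2.length = 1 then p.1 ++ [p.2] else p.1)) = res ++ chunk xs := by
  induction xs using chunk.induct with
  | case1 =>
      intro res t k ht
      simp [pairOffLoop, ht, chunk]
  | case2 x =>
      intro res t k ht
      rw [pairOffLoop_cons, if_pos (mod_two_even k)]
      simp [pairOffLoop, chunk]
  | case3 x y xs ih =>
      intro res t k ht
      rw [pairOffLoop_cons, if_pos (mod_two_even k), pairOffLoop_cons,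
          if_neg (mod_two_odd k)]
      have h2k : 2 * k + 1 + 1 = 2 * (k + 1) := by ring
      rw [h2k]
      have := ih (res ++ [[x] ++ [y]]) ([x] ++ [y]) (k + 1) (by simp)
      simpa [chunk_cons_cons, List.append_assoc] using this

-- B computes chunk: drop/take form first, then the slice comprehension
theorem range_chunk (l : List Int) :
    (List.range ((l.length + 1) / 2)).map (fun k => (l.drop (2 * k)).take 2) = chunk l := by
  induction l using chunk.induct with
  | case1 => simp [chunk]
  | case2 x => simp [chunk]
  | case3 x y xs ih =>
      have hlen : ((x :: y :: xs).length + 1) / 2 = (xs.length + 1) / 2 + 1 := by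
        simp only [List.length_cons]; omega
      have htail : (List.range ((xs.length + 1) / 2)).map
            ((fun k => ((x :: y :: xs).drop (2 * k)).take 2) ∘ Nat.succ) = chunk xs := by
        rw [← ih]
        apply List.map_congr_left
        intro k _
        show ((x :: y :: xs).drop (2 * (k + 1))).take 2 = (xs.drop (2 * k)).take 2
        have h2 : 2 * (k + 1) = (2 * k + 1) + 1 := by ring
        rw [h2, List.drop_succ_cons, List.drop_succ_cons]
      rw [hlen, List.range_succ_eq_map, List.map_cons, List.map_map, chunk_cons_cons, htail]
      norm_num

theorem alt_eq_chunk (l : List Int) : pair_off_alt l = chunk l := by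
  unfold pair_off_alt
  rw [PySem.List.pyRange_of_pos _ _ (by omega : (0:Int) < 2), List.map_map]
  have hm : (if (0:Int) < (l.length : Int) then (((l.length : Int) - 0 + 2 - 1) / 2).toNat else 0)
      = (l.length + 1) / 2 := by
    split_ifs with h <;> omega
  rw [hm, ← range_chunk l]
  apply List.map_congr_left
  intro k _
  simp only [Function.comp_apply]
  have h1 : (0 : Int) + 2 * (k : Int) = ((2 * k : ℕ) : Int) := by push_cast; ring
  rw [h1]
  have h2 : ((2 * k : ℕ) : Int) + 2 = ((2 * k : ℕ) : Int) + ((2 : ℕ) : Int) := by norm_num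
  rw [h2, PySem.List.slice_natCast_add]

-- ===== VERDICT (by name: the statement is the Claim_ definition above) =====
theorem pair_off_spec : Claim_equal_pair_off := by
  unfold Claim_equal_pair_off
  intro l _
  unfold Spec_pair_off pair_off
  rw [alt_eq_chunk]
  by_cases h : l.length = 0
  · have hl : l = [] := by simpa using h
    subst hl
    simp [chunk]
  · rw [if_neg h]
    have := pairOffLoop_spec l [] [] 0 (by simp)
    simpa using this
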